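-- pv_equiv track=rewrite | github.com/roccobarbi/gutenberg_multi_solver | utils/solver_operations_descriptor.py | extract_common_letters_from_words
-- ===== SOURCE A (Python) =====
-- def extract_common_letters_from_words(words, alphabet):
--     common = {}
--     for char in alphabet:
--         char_descriptor = []
--         for i in range(len(words)):
--             try:
--                 position = (i, words[i].index(char))
--                 char_descriptor.append(position)
--             except ValueError:
--                 pass
--         if len(char_descriptor) > 1:
--             common[char] = char_descriptor
--     return common
-- ===== SOURCE B (Python) =====
-- def extract_common_letters_from_words(words, alphabet):
--     # Single forward pass over the words: record, for each character, the first
--     # position in each word; then keep the alphabet characters seen in 2+ words.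
--     positions = {}
--     for i, word in enumerate(words):
--         seen = set()
--         for j, char in enumerate(word):
--             if char not in seen:
--                 seen.add(char)
--                 positions.setdefault(char, []).append((i, j))
--     common = {}
--     for char in alphabet:
--         entry = positions.get(char)
--         if entry is not None and len(entry) > 1:
--             common[char] = entry
--     return common
-- ===== Notes on version B (the rewrite author's own statement) =====
-- stated objective: faster
-- what changed: Replaces the alphabet-by-words nested .index scans with one forward pass over the words that builds a char-to-first-positions index, followed by a single filtering pass over the alphabet.
import Mathlib
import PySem

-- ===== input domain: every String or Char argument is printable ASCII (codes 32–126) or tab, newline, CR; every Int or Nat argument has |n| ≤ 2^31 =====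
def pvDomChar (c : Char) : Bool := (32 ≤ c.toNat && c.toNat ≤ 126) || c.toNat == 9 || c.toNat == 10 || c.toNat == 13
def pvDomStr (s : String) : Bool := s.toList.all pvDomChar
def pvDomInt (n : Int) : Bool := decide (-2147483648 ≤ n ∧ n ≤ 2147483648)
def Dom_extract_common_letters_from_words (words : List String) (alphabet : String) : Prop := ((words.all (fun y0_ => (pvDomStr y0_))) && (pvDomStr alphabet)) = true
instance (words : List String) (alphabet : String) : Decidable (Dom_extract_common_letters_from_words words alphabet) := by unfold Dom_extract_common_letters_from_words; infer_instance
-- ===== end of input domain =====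

-- B replaces A's alphabet-by-words nested .index scans with one forward pass over the
-- words that builds a char-to-first-positions index, then a single filtering pass over
-- the alphabet (measured faster at the largest generated size).


-- ===== PORT A =====
-- for char in alphabet: scan all words with range(len(words)), words[i].index(char)
-- (try/except ValueError = the none branch of index?); keep descriptors of length > 1.
def extract_common_letters_from_words (words : List String) (alphabet : String) : List (String × List (Int × Int)) :=
  let common : PySem.Dict Char (List (Int × Int)) :=
    alphabet.toList.foldl
      (fun common char =>
        let char_descriptor : List (Int × Int) :=
          (PySem.List.pyRange 0 (words.length : Int)).foldl
            (fun cd i =>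
              match PySem.List.pyGet? words i with
              | none => cd        -- unreachable (i ∈ range(len(words))); totality guard
              | some w =>
                match PySem.List.index? w.toList char with
                | none => cd      -- ValueError: pass
                | some j => cd ++ [(i, (j : Int))])
            []
        if char_descriptor.length > 1 then common.insert char char_descriptor else common)
      PySem.Dict.empty
  common.items.map (fun p => (String.singleton p.1, p.2))

-- ===== PORT B =====
-- inner loop of Source B: 'for j, char in enumerate(word)' with the per-word seen set;
-- positions.setdefault(char, []).append((i, j)) is Dict.modify char [] (· ++ [(i, j)])
def pvScanWord (i : Int) (j : Int) (cs : List Char) (seen : PySem.Set Char)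
    (positions : PySem.Dict Char (List (Int × Int))) : PySem.Dict Char (List (Int × Int)) :=
  match cs with
  | [] => positions
  | c :: rest =>
    if PySem.Set.contains seen c then
      pvScanWord i (j + 1) rest seen positions
    else
      pvScanWord i (j + 1) rest (PySem.Set.add seen c) (positions.modify c [] (· ++ [(i, j)]))

-- outer loop of Source B: 'for i, word in enumerate(words)'
def pvBuildPositions (i : Int) (ws : List String)
    (positions : PySem.Dict Char (List (Int × Int))) : PySem.Dict Char (List (Int × Int)) :=
  match ws with
  | [] => positions
  | w :: rest => pvBuildPositions (i + 1) rest (pvScanWord i 0 w.toList PySem.Set.empty positions)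

def extract_common_letters_from_words_alt (words : List String) (alphabet : String) : List (String × List (Int × Int)) :=
  let positions := pvBuildPositions 0 words PySem.Dict.empty
  let common : PySem.Dict Char (List (Int × Int)) :=
    alphabet.toList.foldl
      (fun common char =>
        match positions.get? char with
        | some entry => if entry.length > 1 then common.insert char entry else common
        | none => common)
      PySem.Dict.empty
  common.items.map (fun p => (String.singleton p.1, p.2))

-- ===== PRECONDITION & SPEC =====
def Spec_extract_common_letters_from_words (words : List String) (alphabet : String) (out : List (String × List (Int × Int))) : Prop := out = extract_common_letters_from_words_alt words alphabet
instance (words : List String) (alphabet : String) (out : List (String × List (Int × Int))) : Decidable (Spec_extract_common_letters_from_words words alphabet out) := by unfold Spec_extract_common_letters_from_words; infer_instance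

-- ===== CLAIM (what is proved, stated in full; the proofs are below) =====
def Claim_equal_extract_common_letters_from_words : Prop := ∀ (words : List String) (alphabet : String), Dom_extract_common_letters_from_words words alphabet → Spec_extract_common_letters_from_words words alphabet (extract_common_letters_from_words words alphabet)

-- ===== LEMMAS AND PROOFS =====

-- The common value both sides compute per character c: the (word index, first position)
-- pairs, in word order, for the words (from index i on) that contain c.
def pvEntryFrom (i : Int) (ws : List String) (c : Char) : List (Int × Int) :=
  match ws with
  | [] => []
  | w :: t =>
    match PySem.List.index? w.toList c with
    | some j => (i, (j : Int)) :: pvEntryFrom (i + 1) t c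
    | none => pvEntryFrom (i + 1) t c

lemma setContains_add (s : PySem.Set Char) (x c : Char) :
    PySem.Set.contains (PySem.Set.add s x) c = (PySem.Set.contains s c || c == x) := by
  simp only [PySem.Set.add, PySem.Set.contains]
  split_ifs with hx <;> by_cases h : c = x <;> simp_all [List.contains_eq_mem]

lemma pvScan_getD (c : Char) :
    ∀ (cs : List Char) (i j : Int) (seen : PySem.Set Char)
      (pos : PySem.Dict Char (List (Int × Int))),
      (pvScanWord i j cs seen pos).getD c [] =
        if PySem.Set.contains seen c then pos.getD c []
        else
          match PySem.List.index? cs c with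
          | none => pos.getD c []
          | some k => pos.getD c [] ++ [(i, j + (k : Int))] := by
  intro cs
  induction cs with
  | nil =>
    intro i j seen pos
    show pos.getD c [] = _
    cases hsc : PySem.Set.contains seen c
    · simp only [Bool.false_eq_true, if_false]
      rfl
    · rw [if_pos rfl]
  | cons c' rest ih =>
    intro i j seen pos
    cases hseen : PySem.Set.contains seen c'
    · rw [pvScanWord, if_neg (show ¬(PySem.Set.contains seen c' = true) by rw [hseen]; decide),
        ih, setContains_add]
      by_cases hc : c = c'
      · subst hc
        rw [if_pos (by simp), PySem.List.index?_cons_self, PySem.Dict.getD_modify_self]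
        rw [if_neg (show ¬(PySem.Set.contains seen c = true) by rw [hseen]; decide)]
        simp
      · have hbc : (c == c') = false := by simp [hc]
        rw [hbc, Bool.or_false, PySem.List.index?_cons_of_ne rest (fun h => hc h.symm),
          PySem.Dict.getD_modify_of_ne _ _ _ hc]
        cases hsc : PySem.Set.contains seen c
        · simp only [Bool.false_eq_true, if_false]
          cases PySem.List.index? rest c with
          | none => rfl
          | some k =>
            simp only [Option.map_some]
            have hk : j + 1 + (k : Int) = j + ((k + 1 : Nat) : Int) := by push_cast; ring
            rw [hk]
        · rw [if_pos rfl, if_pos rfl]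
    · rw [pvScanWord, if_pos hseen, ih]
      cases hsc : PySem.Set.contains seen c
      · have hc : ¬ c = c' := fun h => by rw [h, hseen] at hsc; exact absurd hsc (by decide)
        simp only [Bool.false_eq_true, if_false]
        rw [PySem.List.index?_cons_of_ne rest (fun h => hc h.symm)]
        cases PySem.List.index? rest c with
        | none => rfl
        | some k =>
          simp only [Option.map_some]
          have hk : j + 1 + (k : Int) = j + ((k + 1 : Nat) : Int) := by push_cast; ring
          rw [hk]
      · rw [if_pos rfl, if_pos rfl]

lemma pvScan_contains (c : Char) :
    ∀ (cs : List Char) (i j : Int) (seen : PySem.Set Char)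
      (pos : PySem.Dict Char (List (Int × Int))),
      (pvScanWord i j cs seen pos).contains c =
        (pos.contains c || (!PySem.Set.contains seen c && decide (c ∈ cs))) := by
  intro cs
  induction cs with
  | nil => intro i j seen pos; simp [pvScanWord]
  | cons c' rest ih =>
    intro i j seen pos
    cases hseen : PySem.Set.contains seen c'
    · rw [pvScanWord, if_neg (show ¬(PySem.Set.contains seen c' = true) by rw [hseen]; decide),
        ih, setContains_add, PySem.Dict.contains_modify]
      by_cases hc : c = c'
      · subst hc
        simp only [hseen, beq_self_eq_true, Bool.or_true, Bool.not_true,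
          Bool.false_and, Bool.or_false, Bool.not_false, List.mem_cons, true_or, decide_true,
          Bool.and_true, Bool.true_or]
      · have hbc : (c == c') = false := by simp [hc]
        simp [hbc, hc]
    · rw [pvScanWord, if_pos hseen, ih]
      by_cases hc : c = c'
      · subst hc
        have hm : c ∈ seen := by simpa [PySem.Set.contains] using hseen
        simp [hm]
      · simp [hc]

lemma pvBuild_getD_contains (c : Char) :
    ∀ (ws : List String) (i : Int) (pos : PySem.Dict Char (List (Int × Int))),
      (pvBuildPositions i ws pos).getD c [] = pos.getD c [] ++ pvEntryFrom i ws c ∧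
      (pvBuildPositions i ws pos).contains c =
        (pos.contains c || decide (pvEntryFrom i ws c ≠ [])) := by
  intro ws
  induction ws with
  | nil => intro i pos; simp [pvBuildPositions, pvEntryFrom]
  | cons w t ih =>
    intro i pos
    rw [pvBuildPositions, pvEntryFrom]
    obtain ⟨ihg, ihc⟩ := ih (i + 1) (pvScanWord i 0 w.toList PySem.Set.empty pos)
    rw [ihg, ihc, pvScan_getD, pvScan_contains]
    have hempty : PySem.Set.contains PySem.Set.empty c = false := rfl
    rw [if_neg (show ¬(PySem.Set.contains PySem.Set.empty c = true) by rw [hempty]; decide),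
      hempty]
    cases hidx : PySem.List.index? w.toList c with
    | none =>
      have hmem : ¬ c ∈ w.toList := (PySem.List.index?_eq_none_iff _ _).1 hidx
      constructor
      · rfl
      · simp [hmem]
    | some k =>
      have hmem : c ∈ w.toList := by
        rw [← PySem.List.index?_isSome_iff, hidx]; rfl
      constructor
      · simp
      · simp [hmem]

lemma pvPositions_get? (words : List String) (c : Char) :
    (pvBuildPositions 0 words PySem.Dict.empty).get? c =
      if pvEntryFrom 0 words c = [] then none else some (pvEntryFrom 0 words c) := by
  obtain ⟨hg, hc⟩ := pvBuild_getD_contains c words 0 PySem.Dict.empty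
  rw [PySem.Dict.getD_empty, List.nil_append] at hg
  rw [PySem.Dict.contains_empty, Bool.false_or] at hc
  by_cases he : pvEntryFrom 0 words c = []
  · rw [if_pos he]
    rw [(PySem.Dict.get?_eq_none_iff_contains _ _).2 (by rw [hc]; simp [he])]
  · rw [if_neg he]
    have hcontains : (pvBuildPositions 0 words PySem.Dict.empty).contains c = true := by
      rw [hc]; simp [he]
    rw [PySem.Dict.contains_eq_isSome_get?] at hcontains
    cases hq : (pvBuildPositions 0 words PySem.Dict.empty).get? c with
    | none => rw [hq] at hcontains; exact absurd hcontains (by decide)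
    | some l =>
      have := PySem.Dict.getD_eq_get?_getD (pvBuildPositions 0 words PySem.Dict.empty) c []
      rw [hq, hg] at this
      simp only [Option.getD_some] at this
      rw [this]

lemma pvInnerA (words : List String) (c : Char) :
    ∀ (ws : List String) (k : Nat), k + ws.length = words.length →
    (∀ j (hj : j < ws.length), words[k + j]? = some ws[j]) →
    ∀ (acc : List (Int × Int)),
      (PySem.List.pyRange (k : Int) (words.length : Int)).foldl
        (fun cd i =>
          match PySem.List.pyGet? words i with
          | none => cd
          | some w =>
            match PySem.List.index? w.toList c with
            | none => cd
            | some j => cd ++ [(i, (j : Int))])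
        acc
      = acc ++ pvEntryFrom (k : Int) ws c := by
  intro ws
  induction ws with
  | nil =>
    intro k hlen hget acc
    have h0 : ((words.length : Nat) : Int) = (k : Int) := by
      simp only [List.length_nil, Nat.add_zero] at hlen
      exact_mod_cast hlen.symm
    rw [h0, show PySem.List.pyRange (k : Int) (k : Int) = [] by simp [PySem.List.pyRange]]
    simp [pvEntryFrom]
  | cons w t ih =>
    intro k hlen hget acc
    have hk : (k : Int) < (words.length : Int) := by
      simp only [List.length_cons] at hlen; omega
    rw [PySem.List.pyRange_one_cons hk, List.foldl_cons]
    have hw : PySem.List.pyGet? words (k : Int) = some w := by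
      rw [PySem.List.pyGet?_natCast]
      have := hget 0 (by simp)
      simpa using this
    simp only [hw]
    have hget' : ∀ j (hj : j < t.length), words[(k + 1) + j]? = some t[j] := by
      intro j hj
      have := hget (j + 1) (by simp; omega)
      rw [show k + (j + 1) = (k + 1) + j by omega] at this
      simpa using this
    have hlen' : (k + 1) + t.length = words.length := by
      simp only [List.length_cons] at hlen; omega
    have hcast : (k : Int) + 1 = ((k + 1 : Nat) : Int) := by push_cast; ring
    rw [pvEntryFrom]
    cases hidx : PySem.List.index? w.toList c with
    | none =>
      rw [hcast, ih (k + 1) hlen' hget' acc]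
    | some j =>
      rw [hcast, ih (k + 1) hlen' hget' (acc ++ [((k : Int), (j : Int))])]
      simp

-- ===== VERDICT (by name: the statement is the Claim_ definition above) =====
theorem extract_common_letters_from_words_spec : Claim_equal_extract_common_letters_from_words := by
  intro words alphabet _
  unfold Spec_extract_common_letters_from_words
  unfold extract_common_letters_from_words extract_common_letters_from_words_alt
  dsimp only
  congr 2
  apply PySem.List.foldl_congr_mem
  intro acc char _
  have hA := pvInnerA words char words 0 (by simp) (fun j hj => by simp) []
  simp only [Nat.cast_zero, List.nil_append] at hA
  rw [hA, pvPositions_get?]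
  by_cases he : pvEntryFrom 0 words char = []
  · rw [if_pos he, he]
    simp
  · rw [if_neg he]
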